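-- pv_equiv track=rewrite | github.com/mimino01/OSSW6 | connect.py | is_horizontal_win
-- ===== SOURCE A (Python) =====
-- def is_horizontal_win(grid, player, last_played_cell, win_score):                           #수평 승리조건 확인
--     score = 0
--     for cell in grid[last_played_cell[0]]:                                                  #마지막에 놓인 셀의 행에서
--       if cell == player:                                                                    #셀의 색상과 현재 플레이어의 색상과 같다면
--         score += 1                                                                          #score 1 증가
--         if score >= win_score:                                                              #승리 점수 만족시
--           return True                                                                       #True 반환
--       else:                                                                                 #아니라면
--         score = 0
--     return False                                                                            #False를 반환한다.
-- ===== SOURCE B (Python) =====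
-- def is_horizontal_win(grid, player, last_played_cell, win_score):
--     # Scan the row as maximal runs of equal cells; win iff some player-run is long enough.
--     row = grid[last_played_cell[0]]
--     n = len(row)
--     i = 0
--     while i < n:
--         j = i
--         while j < n and row[j] == row[i]:
--             j += 1
--         if row[i] == player and j - i >= win_score:
--             return True
--         i = j
--     return False
-- ===== Notes on version B (the rewrite author's own statement) =====
-- stated objective: alternative
-- what changed: B decomposes the row into maximal runs of equal cells and checks whether some run of the player's cells reaches win_score, instead of A's single pass maintaining a reset counter with an early return inside the loop.
import Mathlib
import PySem

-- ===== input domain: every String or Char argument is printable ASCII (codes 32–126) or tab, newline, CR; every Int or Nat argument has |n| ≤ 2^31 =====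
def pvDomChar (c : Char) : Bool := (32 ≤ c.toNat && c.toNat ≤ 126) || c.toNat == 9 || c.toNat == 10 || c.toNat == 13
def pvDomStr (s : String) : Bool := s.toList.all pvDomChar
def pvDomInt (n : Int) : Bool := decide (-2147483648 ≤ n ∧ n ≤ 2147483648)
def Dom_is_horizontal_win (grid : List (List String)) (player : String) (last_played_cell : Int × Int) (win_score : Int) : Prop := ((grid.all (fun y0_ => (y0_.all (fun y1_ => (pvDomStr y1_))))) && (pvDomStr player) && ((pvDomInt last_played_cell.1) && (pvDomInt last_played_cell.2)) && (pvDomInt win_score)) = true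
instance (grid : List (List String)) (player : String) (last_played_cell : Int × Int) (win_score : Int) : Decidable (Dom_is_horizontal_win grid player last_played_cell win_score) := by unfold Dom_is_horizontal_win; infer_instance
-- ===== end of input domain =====

-- B replaces A's reset-counter pass by a decomposition of the row into maximal runs of equal
-- cells, checking whether some player-run reaches win_score (alternative decomposition, same cost).


-- ===== PORT A =====
-- A's for-loop with the reset counter and the early return, as structural recursion on the row.
def pvLoopA (player : String) (win_score : Int) : List String → Int → Bool
  | [], _ => false
  | cell :: cells, score =>
    if cell == player then
      if win_score ≤ score + 1 then true
      else pvLoopA player win_score cells (score + 1)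
    else pvLoopA player win_score cells 0

def is_horizontal_win (grid : List (List String)) (player : String) (last_played_cell : Int × Int) (win_score : Int) : Bool :=
  match PySem.List.pyGet? grid last_played_cell.1 with
  | none => false  -- Python raises IndexError here; excluded by Pre_
  | some row => pvLoopA player win_score row 0

-- ===== PORT B =====
-- B's outer while-loop: split the row into maximal runs of equal cells (the inner while-loop is the span).
def pvRuns : List String → List (String × Nat)
  | [] => []
  | c :: cs =>
    -- the inner while-loop of Source B: j advances over the cells equal to row[i]
    (c, (cs.takeWhile (· == c)).length + 1) :: pvRuns (cs.dropWhile (· == c))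
termination_by l => l.length
decreasing_by
  exact Nat.lt_succ_of_le (List.length_dropWhile_le (· == c) cs)

def is_horizontal_win_alt (grid : List (List String)) (player : String) (last_played_cell : Int × Int) (win_score : Int) : Bool :=
  match PySem.List.pyGet? grid last_played_cell.1 with
  | none => false  -- Python raises IndexError here; excluded by Pre_
  | some row => (pvRuns row).any (fun p => p.1 == player && decide (win_score ≤ (p.2 : Int)))

-- ===== PRECONDITION & SPEC =====
-- Pre_ excludes exactly the inputs on which Python's grid[last_played_cell[0]] raises IndexError.
def Pre_is_horizontal_win (grid : List (List String)) (player : String) (last_played_cell : Int × Int) (win_score : Int) : Prop :=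
  PySem.Raise.InRange grid.length last_played_cell.1
instance (grid : List (List String)) (player : String) (last_played_cell : Int × Int) (win_score : Int) : Decidable (Pre_is_horizontal_win grid player last_played_cell win_score) := by unfold Pre_is_horizontal_win; infer_instance

def pvWitness_is_horizontal_win : List (List String) × String × (Int × Int) × Int := ([["x", "x", "o"]], "x", (0, 1), 2)

def Spec_is_horizontal_win (grid : List (List String)) (player : String) (last_played_cell : Int × Int) (win_score : Int) (out : Bool) : Prop := out = is_horizontal_win_alt grid player last_played_cell win_score
instance (grid : List (List String)) (player : String) (last_played_cell : Int × Int) (win_score : Int) (out : Bool) : Decidable (Spec_is_horizontal_win grid player last_played_cell win_score out) := by unfold Spec_is_horizontal_win; infer_instance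

-- ===== CLAIM (what is proved, stated in full; the proofs are below) =====
def Claim_equal_is_horizontal_win : Prop := ∀ (grid : List (List String)) (player : String) (last_played_cell : Int × Int) (win_score : Int), Dom_is_horizontal_win grid player last_played_cell win_score → Pre_is_horizontal_win grid player last_played_cell win_score → Spec_is_horizontal_win grid player last_played_cell win_score (is_horizontal_win grid player last_played_cell win_score)

-- ===== LEMMAS AND PROOFS =====

-- single-step unfoldings of A's loop
theorem pvLoopA_cons_player (player : String) (win_score : Int) (cs : List String) (s : Int) :
    pvLoopA player win_score (player :: cs) s =
      if win_score ≤ s + 1 then true else pvLoopA player win_score cs (s + 1) := by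
  simp [pvLoopA]

theorem pvLoopA_cons_other (player : String) (win_score : Int) (x : String) (hx : x ≠ player)
    (cs : List String) (s : Int) :
    pvLoopA player win_score (x :: cs) s = pvLoopA player win_score cs 0 := by
  have hx' : (x == player) = false := by simpa using hx
  simp [pvLoopA, hx']

-- A's loop over a nonempty run of player cells: returns true iff win is reached within the run,
-- otherwise continues on the rest with the accumulated score.
theorem pvLoopA_run (player : String) (win_score : Int) (pre : List String)
    (h : ∀ x ∈ pre, x = player) (rest : List String) (score : Int) :
    pvLoopA player win_score (player :: pre ++ rest) score =
      if win_score ≤ score + ((pre.length : Int) + 1) then true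
      else pvLoopA player win_score rest (score + ((pre.length : Int) + 1)) := by
  induction pre generalizing score with
  | nil => simpa using pvLoopA_cons_player player win_score rest score
  | cons x pre ih =>
    have hx : x = player := h x (by simp)
    have h' : ∀ y ∈ pre, y = player := fun y hy => h y (by simp [hy])
    subst hx
    rw [List.cons_append, pvLoopA_cons_player]
    by_cases hw : win_score ≤ score + 1
    · rw [if_pos hw, if_pos (by simp only [List.length_cons]; push_cast; omega)]
    · rw [if_neg hw, ih h' (score + 1)]
      have h1 : score + 1 + ((pre.length : Int) + 1)
          = score + (((x :: pre).length : Int) + 1) := by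
        simp only [List.length_cons]; push_cast; ring_nf
      rw [h1]

-- A's loop over a run of non-player cells starting with score 0: the run is skipped.
theorem pvLoopA_skip (player : String) (win_score : Int) (pre : List String)
    (h : ∀ x ∈ pre, x ≠ player) (rest : List String) :
    pvLoopA player win_score (pre ++ rest) 0 = pvLoopA player win_score rest 0 := by
  induction pre with
  | nil => rfl
  | cons x pre ih =>
    rw [List.cons_append, pvLoopA_cons_other player win_score x (h x (by simp))]
    exact ih (fun y hy => h y (by simp [hy]))

-- Main equivalence on a single row: A's reset-counter loop equals B's run decomposition.
theorem pvLoop_eq_runs (player : String) (win_score : Int) (row : List String) :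
    pvLoopA player win_score row 0 =
      (pvRuns row).any (fun p => p.1 == player && decide (win_score ≤ (p.2 : Int))) := by
  match row with
  | [] => simp [pvRuns, pvLoopA]
  | c :: cs =>
    have hsplit : cs.takeWhile (· == c) ++ cs.dropWhile (· == c) = cs :=
      List.takeWhile_append_dropWhile
    have ih := pvLoop_eq_runs player win_score (cs.dropWhile (· == c))
    rw [pvRuns]
    simp only [List.any_cons]
    by_cases hc : c = player
    · subst hc
      have hmem : ∀ x ∈ cs.takeWhile (· == c), x = c := by
        intro x hx
        simpa using List.mem_takeWhile_imp hx
      conv_lhs => rw [← hsplit, ← List.cons_append]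
      rw [pvLoopA_run c win_score _ hmem (cs.dropWhile (· == c)) 0]
      have hrest : pvLoopA c win_score (cs.dropWhile (· == c)) (0 + (((cs.takeWhile (· == c)).length : Int) + 1))
          = pvLoopA c win_score (cs.dropWhile (· == c)) 0 := by
        match hdw : cs.dropWhile (· == c) with
        | [] => rfl
        | y :: ys =>
          have hy' : y ≠ c := by
            have := List.head_dropWhile_not (· == c) (l := cs) (by simp [hdw])
            simpa [hdw] using this
          rw [pvLoopA_cons_other c win_score y hy' ys _, pvLoopA_cons_other c win_score y hy' ys 0]
      rw [hrest, ih]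
      by_cases hw : win_score ≤ ((cs.takeWhile (· == c)).length : Int) + 1
      · rw [if_pos (by omega)]
        have hd : (decide (win_score ≤ (((cs.takeWhile (· == c)).length + 1 : Nat) : Int))) = true := by
          simp only [decide_eq_true_eq]; push_cast; omega
        simp only [beq_self_eq_true, Bool.true_and, hd, Bool.true_or]
      · rw [if_neg (by omega)]
        have hd : (decide (win_score ≤ (((cs.takeWhile (· == c)).length + 1 : Nat) : Int))) = false := by
          simp only [decide_eq_false_iff_not]; push_cast; omega
        simp only [beq_self_eq_true, Bool.true_and, hd, Bool.false_or]
    · have hmem : ∀ x ∈ c :: cs.takeWhile (· == c), x ≠ player := by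
        intro x hx
        rcases List.mem_cons.mp hx with h | h
        · simpa [h] using hc
        · have hxc : x = c := by simpa using List.mem_takeWhile_imp h
          simpa [hxc] using hc
      have heq : pvLoopA player win_score (c :: cs) 0 = pvLoopA player win_score (cs.dropWhile (· == c)) 0 := by
        conv_lhs => rw [show c :: cs = (c :: cs.takeWhile (· == c)) ++ cs.dropWhile (· == c) by
          simp [hsplit]]
        exact pvLoopA_skip player win_score _ hmem _
      rw [heq, ih]
      have hc' : (c == player) = false := by simpa using hc
      simp [hc']
termination_by row.length
decreasing_by
  exact Nat.lt_succ_of_le (List.length_dropWhile_le (· == c) cs)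

-- ===== VERDICT (by name: the statement is the Claim_ definition above) =====
theorem is_horizontal_win_spec : Claim_equal_is_horizontal_win := by
  intro grid player lpc win_score _hdom hpre
  unfold Spec_is_horizontal_win is_horizontal_win is_horizontal_win_alt
  match hget : PySem.List.pyGet? grid lpc.1 with
  | none =>
    exact absurd hpre (by simpa using (PySem.List.pyGet?_eq_none_iff (xs := grid) (i := lpc.1)).mp hget)
  | some row =>
    exact pvLoop_eq_runs player win_score row
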